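-- pv_equiv track=rewrite | github.com/meltano/meltano | src/meltano/core/m5o/m5o_file_parser.py | missing_properties
-- ===== SOURCE A (Python) =====
-- def missing_properties(properties, properties_dict):
--     properties_copy = properties.copy()
--     for prop in properties_dict:
--         try:
--             property_index = properties_copy.index(prop)
--             del properties_copy[property_index]
--         except ValueError as e:
--             continue
--     return properties_copy
-- ===== SOURCE B (Python) =====
-- def missing_properties(properties, properties_dict):
--     to_remove = list(properties_dict)
--     result = []
--     for p in properties:
--         if p in to_remove:
--             to_remove.remove(p)
--         else:
--             result.append(p)
--     return result
-- ===== Notes on version B (the rewrite author's own statement) =====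
-- stated objective: alternative
-- what changed: Instead of copying properties and repeatedly index/delete-ing it per dict element, B scans properties once keeping a consumable removal pool built from properties_dict: each element is either matched against (and consumes) a pool entry or appended to the result.
import Mathlib
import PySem

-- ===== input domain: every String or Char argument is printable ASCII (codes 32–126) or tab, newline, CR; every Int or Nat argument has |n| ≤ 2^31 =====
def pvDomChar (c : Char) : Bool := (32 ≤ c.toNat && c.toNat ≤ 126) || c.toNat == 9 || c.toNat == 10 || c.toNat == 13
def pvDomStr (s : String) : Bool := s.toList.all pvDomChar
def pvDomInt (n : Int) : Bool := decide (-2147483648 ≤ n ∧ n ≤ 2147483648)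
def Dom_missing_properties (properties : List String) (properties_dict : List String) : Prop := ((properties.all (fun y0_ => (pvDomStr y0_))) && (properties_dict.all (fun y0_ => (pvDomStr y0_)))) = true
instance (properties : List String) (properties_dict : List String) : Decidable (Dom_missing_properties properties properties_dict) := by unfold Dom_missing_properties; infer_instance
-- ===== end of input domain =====

-- B replaces A's copy-then-repeated-index/delete over properties_dict by a single scan of
-- properties with a consumable removal pool (objective: alternative decomposition, same cost).

-- ===== PORT A =====
-- for prop in properties_dict: try index/del, except ValueError continue
def missing_properties (properties : List String) (properties_dict : List String) : List String :=
  properties_dict.foldl (fun properties_copy prop =>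
    match PySem.List.index? properties_copy prop with
    | some property_index => properties_copy.eraseIdx property_index
    | none => properties_copy) properties

-- ===== PORT B =====
-- for p in properties: if p in to_remove then consume one matching entry else append p to result
def missing_properties_alt (properties : List String) (properties_dict : List String) : List String :=
  (properties.foldl (fun st p =>
      if p ∈ st.2 then (st.1, st.2.erase p) else (st.1 ++ [p], st.2))
    (([] : List String), properties_dict)).1

-- ===== PRECONDITION & SPEC =====
def Spec_missing_properties (properties : List String) (properties_dict : List String) (out : List String) : Prop := out = missing_properties_alt properties properties_dict
instance (properties : List String) (properties_dict : List String) (out : List String) : Decidable (Spec_missing_properties properties properties_dict out) := by unfold Spec_missing_properties; infer_instance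

-- ===== CLAIM (what is proved, stated in full; the proofs are below) =====
def Claim_equal_missing_properties : Prop := ∀ (properties : List String) (properties_dict : List String), Dom_missing_properties properties properties_dict → Spec_missing_properties properties properties_dict (missing_properties properties properties_dict)

-- ===== LEMMAS AND PROOFS =====

-- A's loop body erases the first occurrence of prop (or leaves the list unchanged).
theorem pvStepA_eq_erase (copy : List String) (prop : String) :
    (match PySem.List.index? copy prop with
     | some i => copy.eraseIdx i
     | none => copy) = copy.erase prop := by
  cases hidx : PySem.List.index? copy prop with
  | none =>
    have h := (PySem.List.index?_eq_none_iff _ _).1 hidx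
    simp [List.erase_of_not_mem h]
  | some k =>
    rcases (PySem.List.index?_eq_some_iff _ _ _).1 hidx with ⟨pre, suf, hcopy, hlen, hnot⟩
    subst hcopy; subst hlen
    show (pre ++ prop :: suf).eraseIdx pre.length = (pre ++ prop :: suf).erase prop
    rw [List.eraseIdx_append_of_length_le (Nat.le_refl _),
        List.erase_append_right _ hnot]
    simp

-- The recursion B's fold computes.
def pvGo : List String → List String → List String
  | [], _ => []
  | p :: ps, pool => if p ∈ pool then pvGo ps (pool.erase p) else p :: pvGo ps pool

theorem pvFoldB (ps : List String) (acc pool : List String) :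
    (ps.foldl (fun st p =>
        if p ∈ st.2 then (st.1, st.2.erase p) else (st.1 ++ [p], st.2))
      (acc, pool)).1 = acc ++ pvGo ps pool := by
  induction ps generalizing acc pool with
  | nil => simp [pvGo]
  | cons p ps ih =>
    by_cases h : p ∈ pool
    · simp [pvGo, h, ih]
    · simp [pvGo, h, ih]

theorem pvFoldA_mem (ds : List String) (p : String) (ps : List String) (h : p ∈ ds) :
    ds.foldl (fun l v => l.erase v) (p :: ps) =
      (ds.erase p).foldl (fun l v => l.erase v) ps := by
  induction ds generalizing ps with
  | nil => cases h
  | cons d ds ih =>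
    by_cases hdp : d = p
    · subst hdp
      simp [List.erase_cons_head]
    · have hmem : p ∈ ds := by
        cases h with
        | head => exact absurd rfl hdp
        | tail _ h' => exact h'
      have he : (p :: ps).erase d = p :: ps.erase d := by
        simp [Ne.symm hdp]
      have he2 : (d :: ds).erase p = d :: ds.erase p := by
        simp [hdp]
      rw [he2]
      simp only [List.foldl_cons, he]
      exact ih (ps.erase d) hmem

theorem pvFoldA_not_mem (ds : List String) (p : String) (ps : List String) (h : p ∉ ds) :
    ds.foldl (fun l v => l.erase v) (p :: ps) =
      p :: ds.foldl (fun l v => l.erase v) ps := by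
  induction ds generalizing ps with
  | nil => simp
  | cons d ds ih =>
    have hdp : d ≠ p := fun he => h (he ▸ List.mem_cons_self ..)
    have he : (p :: ps).erase d = p :: ps.erase d := by
      simp [Ne.symm hdp]
    simp only [List.foldl_cons, he]
    exact ih (ps.erase d) (fun hm => h (List.mem_cons_of_mem _ hm))

theorem pvMain (ps ds : List String) :
    ds.foldl (fun l v => l.erase v) ps = pvGo ps ds := by
  induction ps generalizing ds with
  | nil =>
    induction ds with
    | nil => rfl
    | cons d ds ih => simpa using ih
  | cons p ps ih =>
    by_cases h : p ∈ ds
    · rw [pvFoldA_mem ds p ps h, ih (ds.erase p)]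
      simp [pvGo, h]
    · rw [pvFoldA_not_mem ds p ps h, ih ds]
      simp [pvGo, h]

-- ===== VERDICT (by name: the statement is the Claim_ definition above) =====
theorem missing_properties_spec : Claim_equal_missing_properties := by
  intro properties properties_dict _
  unfold Spec_missing_properties missing_properties missing_properties_alt
  rw [pvFoldB]
  have hstep : (fun (properties_copy : List String) (prop : String) =>
      match PySem.List.index? properties_copy prop with
      | some property_index => properties_copy.eraseIdx property_index
      | none => properties_copy) = fun l v => l.erase v := by
    funext l v; exact pvStepA_eq_erase l v
  rw [hstep, pvMain]
  simp
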